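-- pv_equiv track=rewrite | github.com/ASSERT-KTH/Mokav | experiments/pynguin/c4b/single-return/generated_tests/src_2445/0/src_2445.py | func
-- ===== SOURCE A (Python) =====
-- def func(*args):
--
-- 	colors = args[0].split()
-- 	colors.sort()
-- 	sameColor = 0
-- 	lastColor = ''
-- 	for i in range(4):
-- 	    if (colors[i] == lastColor):
-- 	        sameColor += 1
-- 	    lastColor = colors[i]
-- 	return(sameColor)
-- ===== SOURCE B (Python) =====
-- def func(*args):
--     colors = args[0].split()
--     colors.sort()
--     return 4 - len({colors[0], colors[1], colors[2], colors[3]})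
-- ===== Notes on version B (the rewrite author's own statement) =====
-- stated objective: simpler
-- what changed: Replaces the lastColor accumulator loop over range(4) with a closed-form cardinality: adjacent duplicates among four sorted tokens equal 4 minus the number of distinct tokens, computed as 4 - len(set of the first four).
import Mathlib
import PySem

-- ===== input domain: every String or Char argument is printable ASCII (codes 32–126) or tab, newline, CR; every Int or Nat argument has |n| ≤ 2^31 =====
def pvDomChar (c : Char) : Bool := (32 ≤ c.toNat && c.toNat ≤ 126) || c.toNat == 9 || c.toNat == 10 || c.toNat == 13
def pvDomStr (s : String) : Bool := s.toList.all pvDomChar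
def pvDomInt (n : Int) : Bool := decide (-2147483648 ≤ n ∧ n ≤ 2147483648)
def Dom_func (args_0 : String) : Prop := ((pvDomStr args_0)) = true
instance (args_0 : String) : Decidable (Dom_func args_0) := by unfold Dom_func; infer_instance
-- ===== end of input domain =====

-- B replaces A's lastColor loop by the closed form 4 - |{first four sorted tokens}| (objective: simpler).

-- ===== PORT A =====
def func (args_0 : String) : Int :=
  let colors := PySem.List.sorted (PySem.Str.split₀ args_0) (fun x => x) false
  let r := (PySem.List.pyRange 0 4 1).foldl
    (fun (st : Int × String) i =>
      let ci := PySem.List.pyGetD colors i ""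
      ((if ci == st.2 then st.1 + 1 else st.1), ci))
    (0, "")
  r.1

-- ===== PORT B =====
def func_alt (args_0 : String) : Int :=
  let colors := PySem.List.sorted (PySem.Str.split₀ args_0) (fun x => x) false
  4 - PySem.Set.len (PySem.Set.ofList
      [PySem.List.pyGetD colors 0 "", PySem.List.pyGetD colors 1 "",
       PySem.List.pyGetD colors 2 "", PySem.List.pyGetD colors 3 ""])

-- ===== PRECONDITION & SPEC =====
-- Pre_: both programs index colors[0..3]; Python raises IndexError with fewer than four tokens.
def Pre_func (args_0 : String) : Prop := 4 ≤ (PySem.Str.split₀ args_0).length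
instance (args_0 : String) : Decidable (Pre_func args_0) := by unfold Pre_func; infer_instance
def pvWitness_func : String := "red blue red green"
def Spec_func (args_0 : String) (out : Int) : Prop := out = func_alt args_0
instance (args_0 : String) (out : Int) : Decidable (Spec_func args_0 out) := by unfold Spec_func; infer_instance

-- ===== CLAIM (what is proved, stated in full; the proofs are below) =====
def Claim_equal_func : Prop := ∀ (args_0 : String), Dom_func args_0 → Pre_func args_0 → Spec_func args_0 (func args_0)

-- ===== LEMMAS AND PROOFS =====

-- Every token of str.split() is nonempty (split₀.go only pushes a nonempty cur).
lemma split₀_go_ne_nil (s cur : List Char) (acc : List (List Char))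
    (hacc : ∀ t ∈ acc, t ≠ []) :
    ∀ t ∈ PySem.Chars.split₀.go s cur acc, t ≠ [] := by
  induction s generalizing cur acc with
  | nil =>
    intro t ht
    unfold PySem.Chars.split₀.go at ht
    split at ht
    · exact hacc t (List.mem_reverse.mp ht)
    · rcases List.mem_cons.mp (List.mem_reverse.mp ht) with h | h
      · subst h
        rename_i hcur
        simpa [List.isEmpty_iff] using hcur
      · exact hacc t h
  | cons c rest ih =>
    intro t ht
    unfold PySem.Chars.split₀.go at ht
    split at ht
    · split at ht
      · exact ih [] acc hacc t ht
      · refine ih [] (cur.reverse :: acc) ?_ t ht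
        intro u hu
        rcases List.mem_cons.mp hu with h | h
        · subst h
          rename_i hcur
          simpa [List.isEmpty_iff] using hcur
        · exact hacc u h
    · exact ih (c :: cur) acc hacc t ht

lemma split₀_token_ne_empty (s : String) (t : String) (h : t ∈ PySem.Str.split₀ s) : t ≠ "" := by
  simp only [PySem.Str.split₀, List.mem_map] at h
  obtain ⟨l, hl, rfl⟩ := h
  have hne : l ≠ [] := split₀_go_ne_nil s.toList [] [] (by simp) l hl
  intro hcontra
  apply hne
  have := congrArg String.toList hcontra
  simpa using this

-- The core identity: on a sorted 4-prefix a ≤ b ≤ c ≤ d with a nonempty,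
-- A's adjacent-duplicate count equals 4 minus the number of distinct values.
set_option maxRecDepth 8192 in
lemma core (a b c d : String) (t : List String) (ha : a ≠ "")
    (h1 : a ≤ b) (h2 : b ≤ c) (h3 : c ≤ d) :
    ((PySem.List.pyRange 0 4 1).foldl
      (fun (st : Int × String) i =>
        let ci := PySem.List.pyGetD (a :: b :: c :: d :: t) i ""
        ((if ci == st.2 then st.1 + 1 else st.1), ci))
      (0, "")).1
    = 4 - PySem.Set.len (PySem.Set.ofList
       [PySem.List.pyGetD (a :: b :: c :: d :: t) 0 "",
        PySem.List.pyGetD (a :: b :: c :: d :: t) 1 "",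
        PySem.List.pyGetD (a :: b :: c :: d :: t) 2 "",
        PySem.List.pyGetD (a :: b :: c :: d :: t) 3 ""]) := by
  have hrange : PySem.List.pyRange 0 4 1 = [0, 1, 2, 3] := by decide
  have hg0 : PySem.List.pyGetD (a :: b :: c :: d :: t) 0 "" = a := by
    rw [show (0:Int) = ((0:Nat):Int) by norm_num, PySem.List.pyGetD_natCast]; simp [List.getD]
  have hg1 : PySem.List.pyGetD (a :: b :: c :: d :: t) 1 "" = b := by
    rw [show (1:Int) = ((1:Nat):Int) by norm_num, PySem.List.pyGetD_natCast]; simp [List.getD]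
  have hg2 : PySem.List.pyGetD (a :: b :: c :: d :: t) 2 "" = c := by
    rw [show (2:Int) = ((2:Nat):Int) by norm_num, PySem.List.pyGetD_natCast]; simp [List.getD]
  have hg3 : PySem.List.pyGetD (a :: b :: c :: d :: t) 3 "" = d := by
    rw [show (3:Int) = ((3:Nat):Int) by norm_num, PySem.List.pyGetD_natCast]; simp [List.getD]
  rw [hrange]
  simp only [List.foldl, hg0, hg1, hg2, hg3]
  have Ica : c = a → b = a := fun h => le_antisymm (h ▸ h2) h1
  have Icb : c = a → c = b := fun h => h.trans (Ica h).symm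
  have Idb : d = b → c = b := fun h => le_antisymm (h ▸ h3) h2
  have Idc : d = b → d = c := fun h => h.trans (Idb h).symm
  have Ida : d = a → c = a := fun h => le_antisymm (h ▸ h3) (h1.trans h2)
  have Ida2 : d = a → d = c := fun h => h.trans (Ida h).symm
  by_cases hab : b = a
  · by_cases hbc : c = b
    · by_cases hcd : d = c
      · simp [PySem.Set.ofList, PySem.Set.add, PySem.Set.contains, PySem.Set.len,
              ha, hab, hbc, hcd]
      · have hdb : ¬ d = b := fun h => hcd (Idc h)
        have hda : ¬ d = a := fun h => hcd (Ida2 h)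
        simp [PySem.Set.ofList, PySem.Set.add, PySem.Set.contains, PySem.Set.len,
              ha, hab, hbc, hda]
    · have hca : ¬ c = a := fun h => hbc (Icb h)
      by_cases hcd : d = c
      · have hdb : ¬ d = b := fun h => hbc (Idb h)
        have hda : ¬ d = a := fun h => hbc (Icb (Ida h))
        simp [PySem.Set.ofList, PySem.Set.add, PySem.Set.contains, PySem.Set.len,
              ha, hab, hcd, hca]
      · have hdb : ¬ d = b := fun h => hcd (Idc h)
        have hda : ¬ d = a := fun h => hcd (Ida2 h)
        simp [PySem.Set.ofList, PySem.Set.add, PySem.Set.contains, PySem.Set.len,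
              ha, hab, hcd, hca, hda]
  · have hca : ¬ c = a := fun h => hab (Ica h)
    have hda : ¬ d = a := fun h => hab (Ica (Ida h))
    by_cases hbc : c = b
    · by_cases hcd : d = c
      · have hdb : d = b := hcd.trans hbc
        simp [PySem.Set.ofList, PySem.Set.add, PySem.Set.contains, PySem.Set.len,
              ha, hab, hbc, hcd]
      · have hdb : ¬ d = b := fun h => hcd (Idc h)
        simp [PySem.Set.ofList, PySem.Set.add, PySem.Set.contains, PySem.Set.len,
              ha, hab, hbc, hdb, hda]
    · have hdb : ¬ d = b := fun h => hbc (Idb h)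
      by_cases hcd : d = c
      · simp [PySem.Set.ofList, PySem.Set.add, PySem.Set.contains, PySem.Set.len,
              ha, hab, hbc, hcd, hca]
      · simp [PySem.Set.ofList, PySem.Set.add, PySem.Set.contains, PySem.Set.len,
              ha, hab, hbc, hcd, hca, hdb, hda]

-- ===== VERDICT (by name: the statement is the Claim_ definition above) =====
theorem func_spec : Claim_equal_func := by
  intro s _ hpre
  unfold Spec_func func func_alt
  have hlen : 4 ≤ (PySem.List.sorted (PySem.Str.split₀ s) (fun x => x) false).length := by
    rw [PySem.List.length_sorted]; exact hpre
  have hpw := PySem.List.sorted_pairwise (xs := PySem.Str.split₀ s) (key := fun x => x)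
  have hmem : ∀ x ∈ PySem.List.sorted (PySem.Str.split₀ s) (fun x => x) false, x ≠ "" :=
    fun x hx => split₀_token_ne_empty s x ((PySem.List.mem_sorted _ _ _ _).mp hx)
  generalize hg : PySem.List.sorted (PySem.Str.split₀ s) (fun x => x) false = colors at hlen hpw hmem ⊢
  match colors with
  | [] | [_] | [_, _] | [_, _, _] => simp at hlen
  | a :: b :: c :: d :: t =>
    simp only [List.pairwise_cons] at hpw
    exact core a b c d t (hmem a List.mem_cons_self)
      (hpw.1 b (by simp)) (hpw.2.1 c (by simp)) (hpw.2.2.1 d (by simp))
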